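-- pv_equiv track=rewrite | github.com/pypi-data/pypi-mirror-391 | packages/veri-helix/veri_helix-0.2.0.tar.gz/veri_helix-0.2.0/src/helix/seed/minimizer.py | minimizers
-- ===== SOURCE A (Python) =====
-- from collections import deque
-- from typing import List, Tuple
--
-- DNA2 = {"A": 0, "C": 1, "G": 2, "T": 3}
--
-- RC = {"A": "T", "C": "G", "G": "C", "T": "A"}
--
-- def _encode_kmer(kmer: str) -> int:
--     v = 0
--     for c in kmer:
--         v = (v << 2) | DNA2[c]
--     return v
--
-- def _revcomp(kmer: str) -> str:
--     return "".join(RC[b] for b in reversed(kmer))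
--
-- def _canon_hash(kmer: str) -> Tuple[int, bool]:
--     forward = _encode_kmer(kmer)
--     reverse = _encode_kmer(_revcomp(kmer))
--     if forward <= reverse:
--         return forward, False
--     return reverse, True
--
-- def minimizers(seq: str, k: int, w: int) -> List[Tuple[int, str, int]]:
--     """Return [(pos, kmer, hash)] minimizers using canonical k-mers over A/C/G/T."""
--     seq = seq.upper()
--     n = len(seq)
--     if k <= 0 or w <= 0 or n < k or w < 1:
--         return []
--
--     km_hash: List[Tuple[int, str, int | None]] = []
--     for i in range(n - k + 1):
--         kmer = seq[i : i + k]
--         if any(c not in DNA2 for c in kmer):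
--             km_hash.append((i, kmer, None))
--         else:
--             canon, _ = _canon_hash(kmer)
--             km_hash.append((i, kmer, canon))
--
--     out: List[Tuple[int, str, int]] = []
--     dq: deque[int] = deque()
--     for i, (pos, kmer, h) in enumerate(km_hash):
--         if h is not None:
--             while dq and km_hash[dq[-1]][2] is not None and km_hash[dq[-1]][2] >= h:
--                 dq.pop()
--             dq.append(i)
--         left = i - (w - 1)
--         while dq and dq[0] < left:
--             dq.popleft()
--         if left >= 0 and dq:
--             j = dq[0]
--             pj, kj, hj = km_hash[j]
--             if hj is not None:
--                 out.append((pj, kj, hj))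
--     return out
-- ===== SOURCE B (Python) =====
-- DNA2 = {"A": 0, "C": 1, "G": 2, "T": 3}
--
-- def minimizers(seq, k, w):
--     """Rolling 2-bit encoding: forward and reverse-complement hashes updated
--     incrementally in one scan, then the sliding-window minimum pass."""
--     seq = seq.upper()
--     n = len(seq)
--     if k <= 0 or w <= 0 or n < k or w < 1:
--         return []
--
--     limit = 4 ** k          # 2*k-bit window mask (as a modulus)
--     high = 4 ** (k - 1)     # place value of the newest reverse-complement base
--
--     km_hash = []            # (pos, kmer, canonical hash or None)
--     f = r = run = 0
--     for j in range(n):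
--         code = DNA2.get(seq[j])
--         if code is None:
--             f = r = run = 0
--         else:
--             f = (f * 4 + code) % limit
--             r = r // 4 + (3 - code) * high
--             run += 1
--         if j >= k - 1:
--             i = j - k + 1
--             h = (f if f <= r else r) if run >= k else None
--             km_hash.append((i, seq[i : j + 1], h))
--
--     out = []
--     dq = []                 # window candidates: (index, pos, kmer, hash), hashes increasing
--     for i, (pos, kmer, h) in enumerate(km_hash):
--         if h is not None:
--             while dq and dq[-1][3] >= h:
--                 dq.pop()
--             dq.append((i, pos, kmer, h))
--         left = i - (w - 1)
--         while dq and dq[0][0] < left: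
--             dq.pop(0)
--         if left >= 0 and dq:
--             out.append(dq[0][1:])
--     return out
-- ===== Notes on version B (the rewrite author's own statement) =====
-- stated objective: faster
-- what changed: A re-encodes every k-mer from scratch (and builds its reverse complement string) at O(k) per position; B computes the canonical hash with a rolling 2-bit forward/reverse-complement encoding updated in O(1) per character in one scan, and the sliding-minimum deque keeps (index, pos, kmer, hash) entries directly instead of re-indexing the k-mer table.
import Mathlib
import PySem

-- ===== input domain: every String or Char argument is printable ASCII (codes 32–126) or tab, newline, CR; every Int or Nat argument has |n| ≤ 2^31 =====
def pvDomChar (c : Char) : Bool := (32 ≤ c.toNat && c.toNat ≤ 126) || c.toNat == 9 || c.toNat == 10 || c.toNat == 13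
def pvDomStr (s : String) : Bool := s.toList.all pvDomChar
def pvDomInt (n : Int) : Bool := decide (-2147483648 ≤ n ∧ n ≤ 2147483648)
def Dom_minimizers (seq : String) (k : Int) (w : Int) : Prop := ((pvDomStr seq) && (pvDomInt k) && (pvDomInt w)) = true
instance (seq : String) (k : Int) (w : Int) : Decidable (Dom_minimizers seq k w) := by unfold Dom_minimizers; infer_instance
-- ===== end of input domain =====

-- B replaces A's per-k-mer O(k) re-encoding by a rolling 2-bit forward/reverse-complement
-- hash updated in one scan (objective: faster; the deque sliding-minimum pass keeps B's own
-- state — (index, pos, kmer, hash) pairs — instead of re-indexing the k-mer table).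

-- ===== PORT A =====
-- DNA2 / RC module constants (shared literal: B's Python defines the identical DNA2 dict)
def pvDna2 : PySem.Dict Char Int := PySem.Dict.mk [('A', 0), ('C', 1), ('G', 2), ('T', 3)]
def pvRc : PySem.Dict Char Char := PySem.Dict.mk [('A', 'T'), ('C', 'G'), ('G', 'C'), ('T', 'A')]

-- _encode_kmer: v = (v << 2) | DNA2[c].  Codes are in [0,3], so (v<<2)|code = v*4+code exactly;
-- DNA2[c] (KeyError on a non-base) is only reached on validated k-mers, so getD 0 is exact there.
def pvEncodeKmer (kmer : List Char) : Int :=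
  kmer.foldl (fun v c => v * 4 + (pvDna2.get? c).getD 0) 0

-- _revcomp: RC[b] is only reached on validated k-mers, so getD b is exact there.
def pvRevcomp (kmer : List Char) : List Char :=
  kmer.reverse.map (fun b => (pvRc.get? b).getD b)

-- _canon_hash
def pvCanonHash (kmer : List Char) : Int × Bool :=
  let forward := pvEncodeKmer kmer
  let reverse := pvEncodeKmer (pvRevcomp kmer)
  if forward ≤ reverse then (forward, false) else (reverse, true)

-- body of A's km_hash loop for one i
def pvKmEntryA (cs : List Char) (k : Int) (i : Int) : Int × String × Option Int :=
  let kmer := PySem.List.slice cs (some i) (some (i + k))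
  if kmer.any (fun c => (pvDna2.get? c).isNone) then (i, String.ofList kmer, none)
  else (i, String.ofList kmer, some (pvCanonHash kmer).1)

-- while dq and km_hash[dq[-1]][2] is not None and km_hash[dq[-1]][2] >= h: dq.pop()
-- (popping from the right = dropWhile on the reversed list; an out-of-range index, which would
--  raise in Python, is unreachable — dq only ever holds enumerate indices of km_hash)
def pvPopBackA (kmh : List (Int × String × Option Int)) (h : Int) (dq : List Int) : List Int :=
  (dq.reverse.dropWhile (fun j =>
      match PySem.List.pyGet? kmh j with
      | some (_, _, some hj) => decide (hj ≥ h)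
      | _ => false)).reverse

-- body of A's window loop for one enumerated entry
def pvStepA (kmh : List (Int × String × Option Int)) (w : Int)
    (st : List Int × List (Int × String × Int)) (e : Int × (Int × String × Option Int)) :
    List Int × List (Int × String × Int) :=
  let dq := st.1
  let out := st.2
  let i := e.1
  let h := e.2.2.2
  let dq := match h with
    | some hv => pvPopBackA kmh hv dq ++ [i]
    | none => dq
  let left := i - (w - 1)
  let dq := dq.dropWhile (fun j => decide (j < left))
  let out :=
    if left ≥ 0 then
      match dq with
      | [] => out
      | j :: _ =>
        match PySem.List.pyGet? kmh j with
        | some (pj, kj, some hj) => out ++ [(pj, kj, hj)]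
        | _ => out
    else out
  (dq, out)

def minimizers (seq : String) (k : Int) (w : Int) : List (Int × String × Int) :=
  let cs := (PySem.Str.upper seq).toList
  let n : Int := cs.length
  if k ≤ 0 ∨ w ≤ 0 ∨ n < k ∨ w < 1 then []
  else
    let kmh := (PySem.List.pyRange 0 (n - k + 1) 1).foldl
      (fun acc i => acc ++ [pvKmEntryA cs k i]) []
    ((PySem.List.enumerate kmh).foldl (pvStepA kmh w) ([], [])).2

-- ===== PORT B =====
-- rolling scan of Source B: f = (f*4 + code) % limit, r = r//4 + (3-code)*high; both operands are
-- nonnegative and limit > 0, so Python's % and // are PySem.Int.mod / floordiv (used verbatim).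
-- 'for j in range(n)' over the characters = structural recursion on the character list with j.
def pvRollB (cs : List Char) (k limit high : Int) :
    Int → Int → Int → Int → List Char → List (Int × String × Option Int)
  | _, _, _, _, [] => []
  | j, f, r, run, c :: rest =>
    let st :=
      match pvDna2.get? c with
      | none => (0, 0, 0)
      | some code => (PySem.Int.mod (f * 4 + code) limit,
                      PySem.Int.floordiv r 4 + (3 - code) * high, run + 1)
    let f := st.1
    let r := st.2.1
    let run := st.2.2
    let entry :=
      if j ≥ k - 1 then
        let i := j - k + 1
        let h := if run ≥ k then some (if f ≤ r then f else r) else none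
        [(i, String.ofList (PySem.List.slice cs (some i) (some (j + 1))), h)]
      else []
    entry ++ pvRollB cs k limit high (j + 1) f r run rest

-- body of B's window loop; dq holds (index, pos, kmer, hash) pairs with increasing hashes
def pvStepB (w : Int)
    (st : List (Int × Int × String × Int) × List (Int × String × Int))
    (e : Int × (Int × String × Option Int)) :
    List (Int × Int × String × Int) × List (Int × String × Int) :=
  let dq := st.1
  let out := st.2
  let i := e.1
  let dq := match e.2.2.2 with
    | some hv =>
        (dq.reverse.dropWhile (fun q : Int × Int × String × Int => decide (q.2.2.2 ≥ hv))).reverse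
          ++ [(i, e.2.1, e.2.2.1, hv)]
    | none => dq
  let left := i - (w - 1)
  let dq := dq.dropWhile (fun q => decide (q.1 < left))
  let out :=
    if left ≥ 0 then
      match dq with
      | [] => out
      | q :: _ => out ++ [q.2]
    else out
  (dq, out)

def minimizers_alt (seq : String) (k : Int) (w : Int) : List (Int × String × Int) :=
  let cs := (PySem.Str.upper seq).toList
  let n : Int := cs.length
  if k ≤ 0 ∨ w ≤ 0 ∨ n < k ∨ w < 1 then []
  else
    -- limit = 4 ** k, high = 4 ** (k - 1); k ≥ 1 holds in this branch, so Int exponents are Nats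
    let limit : Int := 4 ^ k.toNat
    let high : Int := 4 ^ (k - 1).toNat
    let kmh := pvRollB cs k limit high 0 0 0 0 cs
    ((PySem.List.enumerate kmh).foldl (pvStepB w) ([], [])).2

-- ===== PRECONDITION & SPEC =====
def Spec_minimizers (seq : String) (k : Int) (w : Int) (out : List (Int × String × Int)) : Prop := out = minimizers_alt seq k w
instance (seq : String) (k : Int) (w : Int) (out : List (Int × String × Int)) : Decidable (Spec_minimizers seq k w out) := by unfold Spec_minimizers; infer_instance

-- ===== CLAIM (what is proved, stated in full; the proofs are below) =====
def Claim_equal_minimizers : Prop := ∀ (seq : String) (k : Int) (w : Int), Dom_minimizers seq k w → Spec_minimizers seq k w (minimizers seq k w)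

-- ===== LEMMAS AND PROOFS =====

-- ---- proof-side definitions and lemmas ----
def pvValid (c : Char) : Bool := (pvDna2.get? c).isSome
def pvCode (c : Char) : Int := (pvDna2.get? c).getD 0

theorem valid_cases (c : Char) (h : pvValid c = true) : c = 'A' ∨ c = 'C' ∨ c = 'G' ∨ c = 'T' := by
  simp only [pvValid, pvDna2, PySem.Dict.get?_mk_cons] at h
  split_ifs at h with h1 h2 h3 h4
  · exact Or.inl (eq_of_beq h1).symm
  · exact Or.inr (Or.inl (eq_of_beq h2).symm)
  · exact Or.inr (Or.inr (Or.inl (eq_of_beq h3).symm))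
  · exact Or.inr (Or.inr (Or.inr (eq_of_beq h4).symm))
  · simp [PySem.Dict.get?] at h

theorem code_bounds (c : Char) : 0 ≤ pvCode c ∧ pvCode c < 4 := by
  simp only [pvCode, pvDna2, PySem.Dict.get?_mk_cons]
  split_ifs <;> simp [PySem.Dict.get?]

theorem rc_code (c : Char) (h : pvValid c = true) : pvCode ((pvRc.get? c).getD c) = 3 - pvCode c := by
  rcases valid_cases c h with rfl | rfl | rfl | rfl <;> decide

theorem code_of_get? (c : Char) (d : Int) (h : pvDna2.get? c = some d) : d = pvCode c := by
  simp [pvCode, h]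

theorem valid_of_get? (c : Char) (d : Int) (h : pvDna2.get? c = some d) : pvValid c = true := by
  simp [pvValid, h]

theorem not_valid_of_get? (c : Char) (h : pvDna2.get? c = none) : pvValid c = false := by
  simp [pvValid, h]
def pvVrun (l : List Char) : Int := ((l.reverse.takeWhile pvValid).length : Int)

def pvSfx (p : List Char) (m : Nat) : List Char := p.drop (p.length - m)

theorem encode_from (l : List Char) (v : Int) :
    l.foldl (fun v c => v * 4 + (pvDna2.get? c).getD 0) v
      = v * 4 ^ l.length + pvEncodeKmer l := by
  induction l generalizing v with
  | nil => simp [pvEncodeKmer]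
  | cons c t ih =>
    simp only [List.foldl_cons, List.length_cons, pvEncodeKmer]
    rw [ih, ih (0 * 4 + (pvDna2.get? c).getD 0)]
    ring

theorem encode_append (l : List Char) (c : Char) :
    pvEncodeKmer (l ++ [c]) = pvEncodeKmer l * 4 + pvCode c := by
  simp [pvEncodeKmer, List.foldl_append, pvCode]

theorem encode_cons (c : Char) (l : List Char) :
    pvEncodeKmer (c :: l) = pvCode c * 4 ^ l.length + pvEncodeKmer l := by
  simp only [pvEncodeKmer, List.foldl_cons]
  rw [encode_from]
  simp only [pvCode, pvEncodeKmer]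
  ring

theorem encode_bounds (l : List Char) : 0 ≤ pvEncodeKmer l ∧ pvEncodeKmer l < 4 ^ l.length := by
  induction l with
  | nil => simp [pvEncodeKmer]
  | cons c t ih =>
    rw [encode_cons]
    obtain ⟨h1, h2⟩ := code_bounds c
    obtain ⟨ih1, ih2⟩ := ih
    have hp : (0:Int) < 4 ^ t.length := by positivity
    constructor
    · nlinarith
    · have : pvCode c * 4 ^ t.length ≤ 3 * 4 ^ t.length := by nlinarith
      simp only [List.length_cons, pow_succ]
      nlinarith
theorem revcomp_append (l : List Char) (c : Char) :
    pvRevcomp (l ++ [c]) = ((pvRc.get? c).getD c) :: pvRevcomp l := by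
  simp [pvRevcomp]

theorem revcomp_cons (c : Char) (l : List Char) :
    pvRevcomp (c :: l) = pvRevcomp l ++ [(pvRc.get? c).getD c] := by
  simp [pvRevcomp]

theorem length_revcomp (l : List Char) : (pvRevcomp l).length = l.length := by
  simp [pvRevcomp]

theorem vrun_nonneg (l : List Char) : 0 ≤ pvVrun l := by
  simp [pvVrun]

theorem vrun_le_length (l : List Char) : pvVrun l ≤ (l.length : Int) := by
  simp only [pvVrun, Nat.cast_le]
  exact_mod_cast (List.takeWhile_prefix pvValid).length_le.trans (by simp)

theorem vrun_append (p : List Char) (c : Char) :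
    pvVrun (p ++ [c]) = if pvValid c then pvVrun p + 1 else 0 := by
  simp only [pvVrun, List.reverse_append, List.reverse_cons, List.reverse_nil, List.nil_append,
    List.cons_append, List.takeWhile_cons]
  by_cases h : pvValid c = true <;> simp [h]

theorem tw_len_ge (P : Char → Bool) : ∀ (l : List Char) (m : Nat), m ≤ l.length →
    (∀ c ∈ l.take m, P c = true) → m ≤ (l.takeWhile P).length := by
  intro l
  induction l with
  | nil => intro m hm _; simpa using hm
  | cons x t ih =>
    intro m hm h
    cases m with
    | zero => simp
    | succ m' =>
      have hx : P x = true := h x (by simp)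
      simp only [List.takeWhile_cons, hx, if_true, List.length_cons]
      have := ih m' (by simpa using hm) (fun c hc => h c (by simp [List.take_succ_cons]; tauto))
      omega

-- the (vrun p) trailing characters of p are all valid
theorem vrun_sfx_valid (p : List Char) : ∀ c ∈ pvSfx p (pvVrun p).toNat, pvValid c = true := by
  intro c hc
  simp only [pvSfx, pvVrun, Int.toNat_natCast] at hc
  have htake : p.reverse.take (p.reverse.takeWhile pvValid).length = p.reverse.takeWhile pvValid :=
    (List.prefix_iff_eq_take.mp (List.takeWhile_prefix _)).symm
  have hc' : c ∈ (p.drop (p.length - (p.reverse.takeWhile pvValid).length)).reverse := by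
    simpa using hc
  rw [List.reverse_drop] at hc'
  have hlen : p.length - (p.length - (p.reverse.takeWhile pvValid).length)
      = (p.reverse.takeWhile pvValid).length := by
    have := (List.takeWhile_prefix (l := p.reverse) pvValid).length_le
    simp only [List.length_reverse] at this
    omega
  rw [hlen, htake] at hc'
  exact List.mem_takeWhile_imp hc'

-- if the last m characters of p are all valid then vrun p ≥ m
theorem vrun_ge_of_valid (p : List Char) (m : Nat) (hm : m ≤ p.length)
    (h : ∀ c ∈ pvSfx p m, pvValid c = true) : (m : Int) ≤ pvVrun p := by
  have hget : ∀ c ∈ p.reverse.take m, pvValid c = true := by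
    intro c hc
    apply h
    have : p.reverse.take m = (pvSfx p m).reverse := by
      simp only [pvSfx, List.reverse_drop]
      congr 1
      omega
    rw [this, List.mem_reverse] at hc
    exact hc
  have := tw_len_ge pvValid p.reverse m (by simpa using hm) hget
  simp only [pvVrun]
  exact_mod_cast this
-- rolling-state invariant after consuming prefix p (κ = k.toNat ≥ 1)
def pvInv (κ : Nat) (p : List Char) (f r run : Int) : Prop :=
  run = pvVrun p ∧
  f = pvEncodeKmer (pvSfx p (min (pvVrun p).toNat κ)) ∧
  r = pvEncodeKmer (pvRevcomp (pvSfx p (min (pvVrun p).toNat κ)))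
        * 4 ^ (κ - min (pvVrun p).toNat κ)

theorem pvInv_nil (κ : Nat) : pvInv κ [] 0 0 0 := by
  refine ⟨rfl, ?_, ?_⟩ <;> simp [pvSfx, pvVrun, pvEncodeKmer, pvRevcomp]

theorem sfx_zero (p : List Char) : pvSfx p 0 = [] := by simp [pvSfx]

theorem length_sfx (p : List Char) (m : Nat) (hm : m ≤ p.length) : (pvSfx p m).length = m := by
  simp [pvSfx]; omega

theorem sfx_append_succ (p : List Char) (c : Char) (m : Nat) (hm : m ≤ p.length) :
    pvSfx (p ++ [c]) (m + 1) = pvSfx p m ++ [c] := by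
  simp only [pvSfx, List.length_append, List.length_cons, List.length_nil]
  rw [show p.length + (0+1) - (m+1) = p.length - m by omega,
    List.drop_append_of_le_length (by omega)]

theorem pvInv_step_invalid (κ : Nat) (p : List Char) (c : Char)
    (hc : pvDna2.get? c = none) : pvInv κ (p ++ [c]) 0 0 0 := by
  have hv : pvVrun (p ++ [c]) = 0 := by
    rw [vrun_append, not_valid_of_get? c hc]; simp
  refine ⟨hv.symm, ?_, ?_⟩ <;> simp [hv, sfx_zero, pvEncodeKmer, pvRevcomp]

theorem pvInv_step_valid (κ : Nat) (hκ : 1 ≤ κ) (p : List Char) (f r run : Int) (c : Char)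
    (d : Int) (hc : pvDna2.get? c = some d) (hI : pvInv κ p f r run) :
    pvInv κ (p ++ [c]) (PySem.Int.mod (f * 4 + d) (4 ^ κ))
      (PySem.Int.floordiv r 4 + (3 - d) * 4 ^ (κ - 1)) (run + 1) := by
  obtain ⟨hrun, hf, hr⟩ := hI
  have hvalc : pvValid c = true := valid_of_get? c d hc
  have hdc : d = pvCode c := code_of_get? c d hc
  have hv1 : pvVrun (p ++ [c]) = pvVrun p + 1 := by rw [vrun_append, hvalc]; simp
  have hv0 := vrun_nonneg p
  have hvl := vrun_le_length p
  have hpos : (0:Int) < 4 ^ κ := by positivity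
  set v : Nat := (pvVrun p).toNat with hvdef
  have hvlen : v ≤ p.length := by omega
  by_cases hcase : v < κ
  · -- window still growing: min v κ = v, and it becomes v+1
    have hm : min v κ = v := by omega
    have hm' : min (pvVrun (p ++ [c])).toNat κ = v + 1 := by omega
    have hsfx : pvSfx (p ++ [c]) (v + 1) = pvSfx p v ++ [c] := sfx_append_succ p c v hvlen
    have hx : f * 4 + d = pvEncodeKmer (pvSfx p v ++ [c]) := by
      rw [encode_append, hf, hm, hdc]
    refine ⟨by omega, ?_, ?_⟩
    · rw [hm', hsfx, ← hx, PySem.Int.mod_eq_emod_of_pos hpos]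
      obtain ⟨hb1, hb2⟩ := encode_bounds (pvSfx p v ++ [c])
      rw [hx]
      apply Int.emod_eq_of_lt hb1
      calc pvEncodeKmer (pvSfx p v ++ [c]) < 4 ^ (pvSfx p v ++ [c]).length := hb2
        _ ≤ 4 ^ κ := by
            apply pow_le_pow_right₀ (by norm_num)
            simp [length_sfx p v hvlen]; omega
    · have hmr : κ - min v κ = (κ - v - 1) + 1 := by omega
      have hdiv : PySem.Int.floordiv r 4
          = pvEncodeKmer (pvRevcomp (pvSfx p v)) * 4 ^ (κ - v - 1) := by
        rw [hr, hm, show κ - v = (κ - v - 1) + 1 by omega, pow_succ,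
          PySem.Int.floordiv_eq_ediv_of_pos (by norm_num),
          ← mul_assoc, Int.mul_ediv_cancel _ (by norm_num)]
        simp
      rw [hm', hsfx, revcomp_append, encode_cons, length_revcomp, length_sfx p v hvlen,
        hdiv, rc_code c hvalc, ← hdc]
      have hpow : (4:Int) ^ v * 4 ^ (κ - (v + 1)) = 4 ^ (κ - 1) := by
        rw [← pow_add]; congr 1; omega
      have hmr2 : κ - v - 1 = κ - (v + 1) := by omega
      rw [hmr2]
      linear_combination (d - 3) * hpow
  · -- window full: min v κ = κ stays κ; the oldest base drops out
    have hm : min v κ = κ := by omega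
    have hm' : min (pvVrun (p ++ [c])).toNat κ = κ := by omega
    have hκlen : κ ≤ p.length := by omega
    have hsl : (pvSfx p κ).length = κ := length_sfx p κ hκlen
    rcases hS : pvSfx p κ with _ | ⟨x, t1⟩
    · rw [hS] at hsl; simp at hsl; omega
    have ht1 : t1.length = κ - 1 := by rw [hS] at hsl; simp at hsl; omega
    have hsfx : pvSfx (p ++ [c]) κ = t1 ++ [c] := by
      simp only [pvSfx, List.length_append, List.length_cons, List.length_nil]
      rw [show p.length + (0 + 1) - κ = p.length - κ + 1 by omega,
        List.drop_append_of_le_length (by omega)]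
      congr 1
      have hdd : p.drop (p.length - κ + 1) = (p.drop (p.length - κ)).drop 1 := by
        rw [List.drop_drop]
      rw [hdd, show p.drop (p.length - κ) = pvSfx p κ from rfl, hS, List.drop_one, List.tail_cons]
    refine ⟨by omega, ?_, ?_⟩
    · rw [hm', hsfx]
      have hx : f * 4 + d = pvEncodeKmer (t1 ++ [c]) + pvCode x * 4 ^ κ := by
        rw [hf, hm, hS, hdc, ← encode_append, show (x :: t1) ++ [c] = x :: (t1 ++ [c]) from rfl,
          encode_cons]
        have : (t1 ++ [c]).length = κ := by simp [ht1]; omega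
        rw [this]; ring
      rw [hx, PySem.Int.mod_eq_emod_of_pos hpos, mul_comm (pvCode x) ((4:Int) ^ κ),
        Int.add_mul_emod_self_left]
      obtain ⟨hb1, hb2⟩ := encode_bounds (t1 ++ [c])
      apply Int.emod_eq_of_lt hb1
      calc pvEncodeKmer (t1 ++ [c]) < 4 ^ (t1 ++ [c]).length := hb2
        _ ≤ 4 ^ κ := by apply pow_le_pow_right₀ (by norm_num); simp [ht1]; omega
    · rw [hm', hsfx]
      have hrc : r = pvEncodeKmer (pvRevcomp t1) * 4 + pvCode ((pvRc.get? x).getD x) := by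
        rw [hr, hm, hS, revcomp_cons, encode_append]
        simp
      obtain ⟨hcb1, hcb2⟩ := code_bounds ((pvRc.get? x).getD x)
      have hdiv : PySem.Int.floordiv r 4 = pvEncodeKmer (pvRevcomp t1) := by
        rw [hrc, PySem.Int.floordiv_eq_ediv_of_pos (by norm_num), add_comm,
          Int.add_mul_ediv_right _ _ (by norm_num : (4:Int) ≠ 0),
          Int.ediv_eq_zero_of_lt hcb1 hcb2, zero_add]
      rw [hdiv, revcomp_append, encode_cons, length_revcomp, ht1, rc_code c hvalc, ← hdc]
      simp
      ring


-- ---- the rolling scan produces exactly A's km_hash ----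

theorem entry_eq (cs : List Char) (k : Int) (hk : 1 ≤ k) (q rest' : List Char)
    (f r run : Int) (hcs : q ++ rest' = cs) (hq : k ≤ (q.length : Int))
    (hI : pvInv k.toNat q f r run) :
    (((q.length : Int) - k,
      String.ofList (PySem.List.slice cs (some ((q.length : Int) - k)) (some (q.length : Int))),
      if run ≥ k then some (if f ≤ r then f else r) else none) : Int × String × Option Int)
      = pvKmEntryA cs k ((q.length : Int) - k) := by
  obtain ⟨hrun, hf, hr⟩ := hI
  have hκ : 1 ≤ k.toNat := by omega
  have hκq : k.toNat ≤ q.length := by omega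
  have hqtake : q = cs.take q.length := by rw [← hcs]; simp
  -- the sliced k-mer is exactly the k.toNat-character suffix of q
  have hslice : PySem.List.slice cs (some ((q.length : Int) - k)) (some (q.length : Int))
      = pvSfx q k.toNat := by
    rw [PySem.List.slice_toNat _ (by omega) (by omega)]
    have h1 : ((q.length : Int) - k).toNat = q.length - k.toNat := by omega
    have h2 : ((q.length : Int)).toNat - (q.length - k.toNat) = k.toNat := by omega
    rw [h1, h2]
    calc (cs.drop (q.length - k.toNat)).take k.toNat
        = (cs.take q.length).drop (q.length - k.toNat) := by
          rw [List.drop_take]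
          congr 1
          omega
      _ = pvSfx q k.toNat := by rw [pvSfx, ← hqtake]
  have hv0 := vrun_nonneg q
  have hvl := vrun_le_length q
  -- validity: run ≥ k iff every character of the k-mer is a base
  have hiff : run ≥ k ↔ ∀ c ∈ pvSfx q k.toNat, pvValid c = true := by
    constructor
    · intro hge c hc
      rw [hrun] at hge
      apply vrun_sfx_valid q c
      have hdd : List.drop (q.length - k.toNat) q
          = List.drop (q.length - k.toNat - (q.length - (pvVrun q).toNat))
              (List.drop (q.length - (pvVrun q).toNat) q) := by
        rw [List.drop_drop]
        congr 1
        omega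
      simp only [pvSfx] at hc ⊢
      rw [hdd] at hc
      exact List.drop_subset _ _ hc
    · intro hall
      rw [hrun]
      have := vrun_ge_of_valid q k.toNat hκq hall
      omega
  have hm : min (pvVrun q).toNat k.toNat = k.toNat ∨ ¬ run ≥ k := by
    by_cases hrk : run ≥ k
    · left; rw [hrun] at hrk; omega
    · right; exact hrk
  simp only [pvKmEntryA,
    show ((q.length : Int) - k + k) = (q.length : Int) from by ring, hslice]
  by_cases hrk : run ≥ k
  · have hall := hiff.mp hrk
    have hany : (pvSfx q k.toNat).any (fun c => (pvDna2.get? c).isNone) = false := by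
      simp only [List.any_eq_false]
      intro c hc
      have := hall c hc
      simp only [pvValid, Option.isSome_iff_ne_none] at this
      simpa using this
    have hmk : min (pvVrun q).toNat k.toNat = k.toNat := by rw [hrun] at hrk; omega
    rw [hmk] at hf hr
    have hr' : r = pvEncodeKmer (pvRevcomp (pvSfx q k.toNat)) := by
      rw [hr, Nat.sub_self, pow_zero, mul_one]
    rw [if_pos hrk]
    simp only [hany, Bool.false_eq_true, if_false, pvCanonHash, hf, hr']
    split <;> rfl
  · rw [if_neg hrk]
    have hany : (pvSfx q k.toNat).any (fun c => (pvDna2.get? c).isNone) = true := by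
      by_contra hno
      apply hrk
      apply hiff.mpr
      intro c hc
      rw [Bool.not_eq_true, List.any_eq_false] at hno
      have := hno c hc
      cases hx : pvDna2.get? c with
      | none => rw [hx] at this; simp at this
      | some d => exact valid_of_get? c d hx
    rw [hany]
    simp

theorem roll_spec (cs : List Char) (k : Int) (hk : 1 ≤ k) :
    ∀ (rest p : List Char) (f r run : Int), p ++ rest = cs → pvInv k.toNat p f r run →
      pvRollB cs k (4 ^ k.toNat) (4 ^ (k - 1).toNat) (p.length : Int) f r run rest
        = (PySem.List.pyRange (max 0 ((p.length : Int) - k + 1)) ((cs.length : Int) - k + 1) 1).map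
            (pvKmEntryA cs k) := by
  intro rest
  induction rest with
  | nil =>
    intro p f r run hcs _
    have hp : p = cs := by simpa using hcs
    subst hp
    rw [PySem.List.pyRange_one_eq_nil (le_max_right _ _)]
    rfl
  | cons c rest' ih =>
    intro p f r run hcs hI
    have hn : (cs.length : Int) = (p.length : Int) + 1 + rest'.length := by
      rw [← hcs]; push_cast [List.length_append]; simp; ring
    obtain ⟨f', r', run', hstep, hI'⟩ :
        ∃ f' r' run', (match pvDna2.get? c with
            | none => ((0 : Int), (0 : Int), (0 : Int))
            | some code => (PySem.Int.mod (f * 4 + code) (4 ^ k.toNat),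
                PySem.Int.floordiv r 4 + (3 - code) * 4 ^ ((k - 1).toNat), run + 1))
            = (f', r', run') ∧ pvInv k.toNat (p ++ [c]) f' r' run' := by
      cases hc : pvDna2.get? c with
      | none => exact ⟨0, 0, 0, rfl, pvInv_step_invalid _ p c hc⟩
      | some d =>
        refine ⟨_, _, _, rfl, ?_⟩
        rw [show (k - 1).toNat = k.toNat - 1 by omega]
        exact pvInv_step_valid k.toNat (by omega) p f r run c d hc hI
    have htail := ih (p ++ [c]) f' r' run' (by simpa using hcs) hI'
    rw [show ((p ++ [c]).length : Int) = (p.length : Int) + 1 by simp]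
      at htail
    simp only [pvRollB]
    rw [hstep]
    by_cases hj : (p.length : Int) ≥ k - 1
    · rw [if_pos hj]
      have hq : k ≤ ((p ++ [c]).length : Int) := by simp; omega
      have hent := entry_eq cs k hk (p ++ [c]) rest' f' r' run' (by simpa using hcs) hq hI'
      rw [show (((p ++ [c]).length : Int)) = (p.length : Int) + 1 by simp] at hent
      have hmax : max 0 ((p.length : Int) - k + 1) = (p.length : Int) - k + 1 := by omega
      have hlt : (p.length : Int) - k + 1 < (cs.length : Int) - k + 1 := by omega
      rw [hmax, PySem.List.pyRange_one_cons hlt, List.map_cons]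
      rw [show max 0 ((p.length : Int) + 1 - k + 1) = (p.length : Int) - k + 1 + 1 by omega]
        at htail
      rw [htail, List.singleton_append]
      rw [show (p.length : Int) + 1 - k = (p.length : Int) - k + 1 by ring] at hent
      exact congrArg₂ List.cons hent rfl
    · rw [if_neg hj]
      simp only [List.nil_append]
      rw [show max 0 ((p.length : Int) + 1 - k + 1) = 0 by omega] at htail
      rw [show max 0 ((p.length : Int) - k + 1) = 0 by omega]
      exact htail

-- ---- the two window passes agree ----

theorem dropWhile_congr_mem' {α : Type} (l : List α) (p q : α → Bool)
    (h : ∀ x ∈ l, p x = q x) : l.dropWhile p = l.dropWhile q := by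
  induction l with
  | nil => rfl
  | cons x t ih =>
    simp only [List.dropWhile_cons]
    rw [h x (by simp)]
    split
    · exact ih (fun y hy => h y (by simp [hy]))
    · rfl

def pvLook (K : List (Int × String × Option Int)) (q : Int × Int × String × Int) : Prop :=
  PySem.List.pyGet? K q.1 = some (q.2.1, q.2.2.1, some q.2.2.2)

theorem step_AB (K : List (Int × String × Option Int)) (w : Int)
    (dqB : List (Int × Int × String × Int)) (out : List (Int × String × Int))
    (hlook : ∀ q ∈ dqB, pvLook K q)
    (i : Int) (e : Int × String × Option Int) (he : PySem.List.pyGet? K i = some e) :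
    (pvStepA K w (dqB.map (·.1), out) (i, e)).1 = (pvStepB w (dqB, out) (i, e)).1.map (·.1) ∧
    (∀ q ∈ (pvStepB w (dqB, out) (i, e)).1, pvLook K q) ∧
    (pvStepA K w (dqB.map (·.1), out) (i, e)).2 = (pvStepB w (dqB, out) (i, e)).2 := by
  -- the deques after the push phase
  have key : (match e.2.2 with
        | some hv => pvPopBackA K hv (dqB.map (fun q : Int × Int × String × Int => q.1)) ++ [i]
        | none => dqB.map (fun q : Int × Int × String × Int => q.1))
      = (match e.2.2 with
        | some hv => (dqB.reverse.dropWhile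
              (fun q : Int × Int × String × Int => decide (q.2.2.2 ≥ hv))).reverse
              ++ [(i, e.1, e.2.1, hv)]
        | none => dqB).map (fun q : Int × Int × String × Int => q.1) ∧
      (∀ q ∈ (match e.2.2 with
        | some hv => (dqB.reverse.dropWhile
              (fun q : Int × Int × String × Int => decide (q.2.2.2 ≥ hv))).reverse
              ++ [(i, e.1, e.2.1, hv)]
        | none => dqB), pvLook K q) := by
    cases hE : e.2.2 with
    | none => exact ⟨rfl, hlook⟩
    | some hv =>
      constructor
      · simp only [pvPopBackA, List.map_append]
        rw [show (dqB.map (fun q : Int × Int × String × Int => q.1)).reverse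
            = dqB.reverse.map (fun q : Int × Int × String × Int => q.1) from
            List.map_reverse.symm, List.dropWhile_map, List.map_reverse]
        rw [show List.map (fun q : Int × Int × String × Int => q.1) [(i, e.1, e.2.1, hv)] = [i]
          from rfl]
        refine congrArg (fun l => (List.map (fun q : Int × Int × String × Int => q.1) l).reverse
          ++ [i]) (dropWhile_congr_mem' _ _ _ ?_)
        intro q hq
        rw [List.mem_reverse] at hq
        have := hlook q hq
        simp only [Function.comp, pvLook] at this ⊢
        rw [this]
      · intro q hq
        rw [List.mem_append] at hq
        rcases hq with hq | hq
        · rw [List.mem_reverse] at hq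
          have hq' := (List.dropWhile_sublist _).mem hq
          rw [List.mem_reverse] at hq'
          exact hlook q hq'
        · simp only [List.mem_singleton] at hq
          subst hq
          simp only [pvLook]
          rw [he]
          have : e = (e.1, e.2.1, e.2.2) := rfl
          rw [this, hE]
  obtain ⟨kmap, klook⟩ := key
  simp only [pvStepA, pvStepB]
  rw [kmap]
  set D := (match e.2.2 with
      | some hv => (dqB.reverse.dropWhile
            (fun q : Int × Int × String × Int => decide (q.2.2.2 ≥ hv))).reverse
            ++ [(i, e.1, e.2.1, hv)]
      | none => dqB) with hD
  have hmapdrop : (D.map (fun q : Int × Int × String × Int => q.1)).dropWhile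
        (fun j => decide (j < i - (w - 1)))
      = (D.dropWhile (fun q : Int × Int × String × Int => decide (q.1 < i - (w - 1)))).map
        (fun q : Int × Int × String × Int => q.1) := List.dropWhile_map
  refine ⟨by rw [hmapdrop], ?_, ?_⟩
  · intro q hq
    exact klook q ((List.dropWhile_sublist _).mem hq)
  · rw [hmapdrop]
    split
    · cases hT : D.dropWhile (fun q : Int × Int × String × Int => decide (q.1 < i - (w - 1))) with
      | nil => rfl
      | cons q t =>
        have hq : q ∈ D := (List.dropWhile_sublist _).mem (by rw [hT]; simp)
        have hlq := klook q hq
        simp only [List.map_cons, pvLook] at hlq ⊢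
        rw [hlq]
    · rfl

theorem fold_AB (K : List (Int × String × Option Int)) (w : Int) :
    ∀ (L : List (Int × (Int × String × Option Int)))
      (dqB : List (Int × Int × String × Int)) (out : List (Int × String × Int)),
      (∀ q ∈ dqB, pvLook K q) → (∀ p ∈ L, PySem.List.pyGet? K p.1 = some p.2) →
      (L.foldl (pvStepA K w) (dqB.map (·.1), out)).2 = (L.foldl (pvStepB w) (dqB, out)).2 := by
  intro L
  induction L with
  | nil => intro dqB out _ _; rfl
  | cons p t ih =>
    intro dqB out hlook hL
    obtain ⟨h1, h2, h3⟩ := step_AB K w dqB out hlook p.1 p.2 (hL p (by simp))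
    simp only [List.foldl_cons]
    rw [show (p.1, p.2) = p from rfl] at h1 h2 h3
    calc (t.foldl (pvStepA K w) (pvStepA K w (dqB.map (·.1), out) p)).2
        = (t.foldl (pvStepA K w) ((pvStepB w (dqB, out) p).1.map (·.1),
            (pvStepB w (dqB, out) p).2)).2 := by rw [← h1, ← h3]
      _ = (t.foldl (pvStepB w) ((pvStepB w (dqB, out) p).1,
            (pvStepB w (dqB, out) p).2)).2 := ih _ _ h2 (fun q hq => hL q (by simp [hq]))
      _ = (t.foldl (pvStepB w) (pvStepB w (dqB, out) p)).2 := rfl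

-- ===== VERDICT (by name: the statement is the Claim_ definition above) =====
theorem minimizers_spec : Claim_equal_minimizers := by
  intro seq k w _
  unfold Spec_minimizers minimizers minimizers_alt
  simp only []
  set cs := (PySem.Str.upper seq).toList with hcsdef
  by_cases hg : k ≤ 0 ∨ w ≤ 0 ∨ ((cs.length : Int)) < k ∨ w < 1
  · rw [if_pos hg, if_pos hg]
  · rw [if_neg hg, if_neg hg]
    push Not at hg
    obtain ⟨hk0, hw0, hnk, hw1⟩ := hg
    have hk : 1 ≤ k := by omega
    have hA : (PySem.List.pyRange 0 ((cs.length : Int) - k + 1) 1).foldl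
        (fun acc i => acc ++ [pvKmEntryA cs k i]) []
        = (PySem.List.pyRange 0 ((cs.length : Int) - k + 1) 1).map (pvKmEntryA cs k) :=
      by rw [PySem.List.foldl_append_singleton_eq_map _ _ []]; rfl
    have hB : pvRollB cs k (4 ^ k.toNat) (4 ^ (k - 1).toNat) 0 0 0 0 cs
        = (PySem.List.pyRange 0 ((cs.length : Int) - k + 1) 1).map (pvKmEntryA cs k) := by
      have h0 := roll_spec cs k hk cs [] 0 0 0 (by simp) (pvInv_nil k.toNat)
      rw [show ((([] : List Char).length : Int)) = 0 by simp,
        show max 0 ((0 : Int) - k + 1) = 0 by omega] at h0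
      exact h0
    set K := (PySem.List.pyRange 0 ((cs.length : Int) - k + 1) 1).map (pvKmEntryA cs k) with hK
    rw [hA, hB]
    have hL : ∀ p ∈ PySem.List.enumerate K 0, PySem.List.pyGet? K p.1 = some p.2 := by
      intro p hp
      rw [PySem.List.mem_enumerate_iff] at hp
      obtain ⟨kk, hkk, rfl⟩ := hp
      simp only [zero_add]
      rw [PySem.List.pyGet?_natCast]
      simp [hkk]
    have := fold_AB K w (PySem.List.enumerate K 0) [] [] (by simp) hL
    simpa using this
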